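-- pv_equiv track=rewrite | github.com/manas-17045/LeetcodeSolutions | Leetcode 3801-3900/3814/3814.py | maxCapacity
-- ===== SOURCE A (Python) =====
-- import bisect
--
-- def maxCapacity(costs: list[int], capacity: list[int], budget: int) -> int:
--     """
--     Calculates the maximum total capacity achievable by selecting at most two machines
--     within the given budget.
--
--     Args:
--         costs (list[int]): A list of costs for each machine.
--         capacity (list[int]): A list of capacities for each machine.
--         budget (int): The maximum total cost allowed.
--
--     Returns:
--         int: The maximum total capacity possible.
--     """
--     n = len(costs)
--     machines = sorted(zip(costs, capacity))
--     sortedCosts = [m[0] for m in machines]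
--
--     prefixMaxCapacity = [0] * n
--     currentMax = 0
--     for i in range(n):
--         currentMax = max(currentMax, machines[i][1])
--         prefixMaxCapacity[i] = currentMax
--
--     maxTotalCapacity = 0
--
--     for j in range(n):
--         machineCost = machines[j][0]
--         machineCap = machines[j][1]
--
--         if machineCost < budget:
--             maxTotalCapacity = max(maxTotalCapacity, machineCap)
--         else:
--             break
--
--         remainingBudget = budget - machineCost
--         idx = bisect.bisect_left(sortedCosts, remainingBudget)
--
--         limitIndex = min(j, idx) - 1
--
--         if limitIndex >= 0:
--             pairCapacity = machineCap + prefixMaxCapacity[limitIndex]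
--             maxTotalCapacity = max(maxTotalCapacity, pairCapacity)
--
--     return maxTotalCapacity
-- ===== SOURCE B (Python) =====
-- def maxCapacity(costs: list, capacity: list, budget: int) -> int:
--     # Sort machines by (cost, capacity); a pair is affordable when the cheaper
--     # machine's cost is below the budget left after buying the dearer one.
--     machines = sorted(zip(costs, capacity))
--     best = 0
--     prev = []                      # machines already seen (the cheaper ones)
--     for c, k in machines:
--         if c < budget:
--             best = max(best, k)
--             for pc, pk in prev:
--                 if pc + c < budget:
--                     best = max(best, pk + k)
--         prev.append((c, k))
--     return best
-- ===== Notes on version B (the rewrite author's own statement) =====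
-- stated objective: simpler
-- what changed: Drops A's prefix-max array, the separate sortedCosts list, the bisect binary search and the break: B is a plain quadratic scan that, for each machine within budget, scans all cheaper machines directly for the best affordable partner.
import Mathlib
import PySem

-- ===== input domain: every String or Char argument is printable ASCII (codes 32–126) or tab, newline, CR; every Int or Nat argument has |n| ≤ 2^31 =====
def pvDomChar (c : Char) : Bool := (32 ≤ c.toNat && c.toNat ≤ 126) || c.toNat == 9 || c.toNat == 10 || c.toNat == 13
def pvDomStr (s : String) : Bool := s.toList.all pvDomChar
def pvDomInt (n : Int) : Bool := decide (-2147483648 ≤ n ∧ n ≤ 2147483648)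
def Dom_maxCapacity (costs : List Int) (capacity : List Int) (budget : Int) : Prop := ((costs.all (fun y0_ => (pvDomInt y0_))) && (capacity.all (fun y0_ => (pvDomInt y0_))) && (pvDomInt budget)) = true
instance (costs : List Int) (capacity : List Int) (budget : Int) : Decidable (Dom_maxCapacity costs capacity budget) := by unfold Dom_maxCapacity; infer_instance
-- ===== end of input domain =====

-- B drops A's prefix-max array, sortedCosts list, bisect search and break: it is a plain
-- quadratic scan over the cheaper machines seen so far (objective: simpler).

-- ===== PORT A =====
-- the main 'for j in range(n)' loop of A, with 'break' as early return
def maxCapLoopA (machines : List (Int × Int)) (sortedCosts : List Int) (prefixMax : List Int) (budget : Int) : List Int → Int → Int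
  | [], acc => acc
  | j :: rest, acc =>
    let machineCost := (PySem.List.pyGetD machines j (0, 0)).1
    let machineCap := (PySem.List.pyGetD machines j (0, 0)).2
    if machineCost < budget then
      let acc1 := max acc machineCap
      let remainingBudget := budget - machineCost
      let idx := PySem.List.bisectLeft sortedCosts remainingBudget
      let limitIndex : Int := min j (idx : Int) - 1
      let acc2 := if 0 ≤ limitIndex then max acc1 (machineCap + PySem.List.pyGetD prefixMax limitIndex 0) else acc1
      maxCapLoopA machines sortedCosts prefixMax budget rest acc2
    else acc

def maxCapacity (costs : List Int) (capacity : List Int) (budget : Int) : Int :=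
  let n : Int := PySem.List.len costs
  let machines := PySem.List.sorted2 (costs.zip capacity) (fun m => m.1) (fun m => m.2)
  let sortedCosts := machines.map (fun m => m.1)
  let pm := (PySem.List.pyRange 0 n).foldl
      (fun (st : List Int × Int) i =>
        let currentMax := max st.2 (PySem.List.pyGetD machines i (0, 0)).2
        (st.1 ++ [currentMax], currentMax)) ([], 0)
  maxCapLoopA machines sortedCosts pm.1 budget (PySem.List.pyRange 0 n) 0

-- ===== PORT B =====
-- the 'for c, k in machines' loop of B, carrying 'prev' (machines seen so far) and 'best';
-- the inner 'for pc, pk in prev' loop is the foldl over prev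
def maxCapLoopB (budget : Int) : List (Int × Int) → List (Int × Int) → Int → Int
  | [], _, best => best
  | (c, k) :: rest, prev, best =>
    let best1 := if c < budget then
        prev.foldl (fun b (m : Int × Int) => if m.1 + c < budget then max b (m.2 + k) else b) (max best k)
      else best
    maxCapLoopB budget rest (prev ++ [(c, k)]) best1

def maxCapacity_alt (costs : List Int) (capacity : List Int) (budget : Int) : Int :=
  let machines := PySem.List.sorted2 (costs.zip capacity) (fun m => m.1) (fun m => m.2)
  maxCapLoopB budget machines [] 0

-- ===== PRECONDITION & SPEC =====
-- Pre_ excludes exactly the inputs with len(capacity) < len(costs): there A indexes the (shorter)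
-- zipped machine list with range(len(costs)) and raises IndexError.
def Pre_maxCapacity (costs : List Int) (capacity : List Int) (budget : Int) : Prop :=
  costs.length ≤ capacity.length
instance (costs : List Int) (capacity : List Int) (budget : Int) : Decidable (Pre_maxCapacity costs capacity budget) := by unfold Pre_maxCapacity; infer_instance

def pvWitness_maxCapacity : List Int × List Int × Int := ([2, 1, 4], [3, 5, 1], 5)

def Spec_maxCapacity (costs : List Int) (capacity : List Int) (budget : Int) (out : Int) : Prop := out = maxCapacity_alt costs capacity budget
instance (costs : List Int) (capacity : List Int) (budget : Int) (out : Int) : Decidable (Spec_maxCapacity costs capacity budget out) := by unfold Spec_maxCapacity; infer_instance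

-- ===== CLAIM (what is proved, stated in full; the proofs are below) =====
def Claim_equal_maxCapacity : Prop := ∀ (costs : List Int) (capacity : List Int) (budget : Int), Dom_maxCapacity costs capacity budget → Pre_maxCapacity costs capacity budget → Spec_maxCapacity costs capacity budget (maxCapacity costs capacity budget)

-- ===== LEMMAS AND PROOFS =====

theorem maxCap_sorted2_eq_sorted_lex (xs : List (Int × Int)) :
    PySem.List.sorted2 xs (fun m => m.1) (fun m => m.2) =
      PySem.List.sorted xs (fun m => (toLex m : Lex (Int × Int))) := by
  unfold PySem.List.sorted2 PySem.List.sorted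
  simp only [if_neg (by decide : ¬ (false = true))]
  congr 1
  funext acc x
  congr 1
  funext a b
  rcases a with ⟨a1, a2⟩
  rcases b with ⟨b1, b2⟩
  have hiff : ((toLex (a1, a2) : Lex (Int × Int)) < toLex (b1, b2)) ↔
      a1 < b1 ∨ (a1 = b1 ∧ a2 < b2) := by
    simpa using (Prod.Lex.lt_iff (x := (toLex (a1, a2) : Lex (Int × Int))) (y := toLex (b1, b2)))
  show (decide (a1 < b1) || (!decide (b1 < a1) && decide (a2 < b2)))
      = decide ((toLex (a1, a2) : Lex (Int × Int)) < toLex (b1, b2))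
  by_cases h1 : a1 < b1 <;> by_cases h2 : b1 < a1 <;> by_cases h3 : a2 < b2 <;>
    simp [hiff, h1, h2, h3] <;> omega

theorem maxCap_machines_pairwise (xs : List (Int × Int)) :
    List.Pairwise (fun a b : Int × Int => a.1 ≤ b.1)
      (PySem.List.sorted xs (fun m => (toLex m : Lex (Int × Int)))) := by
  have h := PySem.List.sorted_pairwise xs (fun m => (toLex m : Lex (Int × Int)))
  refine h.imp ?_
  intro a b hab
  have h' := Prod.Lex.le_iff.1 hab
  simp only [ofLex_toLex] at h'
  rcases h' with h' | ⟨h', _⟩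
  · exact le_of_lt h'
  · exact le_of_eq h'

-- the list A's prefix-max fold builds, in structural form
def maxCapPmList : Int → List (Int × Int) → List Int
  | _, [] => []
  | v, m :: r => (max v m.2) :: maxCapPmList (max v m.2) r

theorem maxCapPm_fold (M : List (Int × Int)) :
    ∀ (l : List Int) (v : Int),
      (M.foldl (fun (st : List Int × Int) m => (st.1 ++ [max st.2 m.2], max st.2 m.2)) (l, v)).1
        = l ++ maxCapPmList v M := by
  induction M with
  | nil => intro l v; simp [maxCapPmList]
  | cons m r ih =>
    intro l v
    simp only [List.foldl_cons, maxCapPmList]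
    rw [ih]
    simp

theorem maxCapPmList_getD (M : List (Int × Int)) :
    ∀ (v : Int) (t : Nat), t < M.length →
      (maxCapPmList v M).getD t 0 = (M.take (t + 1)).foldl (fun a m => max a m.2) v := by
  induction M with
  | nil => intro v t h; simp at h
  | cons m r ih =>
    intro v t h
    cases t with
    | zero => simp [maxCapPmList]
    | succ t =>
      simp only [maxCapPmList, List.getD_cons_succ, List.take_succ_cons, List.foldl_cons]
      exact ih (max v m.2) t (by simpa using h)

theorem maxCapFoldl_max_add (k : Int) :
    ∀ (L : List (Int × Int)) (b0 v : Int),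
      L.foldl (fun b m => max b (m.2 + k)) (max b0 (k + v))
        = max b0 (k + L.foldl (fun a m => max a m.2) v) := by
  intro L
  induction L with
  | nil => intro b0 v; simp [List.foldl]
  | cons m r ih =>
    intro b0 v
    simp only [List.foldl_cons]
    have h : max (max b0 (k + v)) (m.2 + k) = max b0 (k + max v m.2) := by omega
    rw [h, ih]

theorem maxCapFoldl_guard_true (c k budget : Int) :
    ∀ (L : List (Int × Int)) (b0 : Int), (∀ m ∈ L, m.1 + c < budget) →
      L.foldl (fun b m => if m.1 + c < budget then max b (m.2 + k) else b) b0
        = L.foldl (fun b m => max b (m.2 + k)) b0 := by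
  intro L
  induction L with
  | nil => intro b0 _; rfl
  | cons m r ih =>
    intro b0 h
    simp only [List.foldl_cons, if_pos (h m (by simp))]
    exact ih _ (fun x hx => h x (by simp [hx]))

theorem maxCapFoldl_guard_false (c k budget : Int) :
    ∀ (L : List (Int × Int)) (b0 : Int), (∀ m ∈ L, ¬ m.1 + c < budget) →
      L.foldl (fun b m => if m.1 + c < budget then max b (m.2 + k) else b) b0 = b0 := by
  intro L
  induction L with
  | nil => intro b0 _; rfl
  | cons m r ih =>
    intro b0 h
    simp only [List.foldl_cons, if_neg (h m (by simp))]
    exact ih _ (fun x hx => h x (by simp [hx]))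

theorem maxCapLoopB_skip (budget : Int) :
    ∀ (rest prev : List (Int × Int)) (best : Int), (∀ m ∈ rest, ¬ m.1 < budget) →
      maxCapLoopB budget rest prev best = best := by
  intro rest
  induction rest with
  | nil => intro prev best _; rfl
  | cons m r ih =>
    intro prev best h
    rcases m with ⟨c, k⟩
    rw [maxCapLoopB]
    simp only [if_neg (h (c, k) (by simp))]
    exact ih _ best (fun x hx => h x (by simp [hx]))

theorem maxCapLoops_eq (M : List (Int × Int)) (budget : Int)
    (hM : List.Pairwise (fun a b : Int × Int => a.1 ≤ b.1) M) :
    ∀ (rest prev : List (Int × Int)) (acc : Int), M = prev ++ rest →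
      maxCapLoopA M (M.map (fun m => m.1)) (maxCapPmList 0 M) budget
          (PySem.List.pyRange (prev.length : Int) (M.length : Int)) acc
        = maxCapLoopB budget rest prev acc := by
  have hs : List.Pairwise (fun a b : Int => a ≤ b) (M.map (fun m => m.1)) :=
    hM.map _ (fun a b h => h)
  intro rest
  induction rest with
  | nil =>
    intro prev acc hEq
    have hlen : M.length = prev.length := by rw [hEq]; simp
    rw [PySem.List.pyRange_one_eq_nil (by omega)]
    rfl
  | cons mh rest ih =>
    intro prev acc hEq
    rcases mh with ⟨c, k⟩
    have hlenEq : M.length = prev.length + (rest.length + 1) := by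
      rw [hEq, List.length_append, List.length_cons]
    have hj : prev.length < M.length := by omega
    have hget : PySem.List.pyGetD M (prev.length : Int) ((0 : Int), (0 : Int)) = (c, k) := by
      rw [PySem.List.pyGetD_natCast, hEq,
        List.getD_eq_getElem _ _ (show prev.length < (prev ++ (c, k) :: rest).length by
          rw [List.length_append, List.length_cons]; omega),
        List.getElem_append_right (le_refl _)]
      simp
    rw [PySem.List.pyRange_one_cons (by exact_mod_cast hj), maxCapLoopA, maxCapLoopB]
    by_cases hc : c < budget
    · simp only [hget, if_pos hc]
      have hEq' : M = (prev ++ [(c, k)]) ++ rest := by rw [hEq]; simp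
      have harith : ((prev.length : Int) + 1) = (((prev ++ [(c, k)]).length : Nat) : Int) := by
        rw [List.length_append, List.length_cons, List.length_nil]; push_cast; ring
      rw [harith, ih (prev ++ [(c, k)]) _ hEq']
      congr 1
      -- the per-step accumulators coincide
      set acc1 := max acc k with hacc1
      set rem := budget - c with hrem
      obtain ⟨hle, hlt, hge⟩ := PySem.List.bisectLeft_spec (M.map (fun m => m.1)) rem hs
      set idx := PySem.List.bisectLeft (M.map (fun m => m.1)) rem with hidx
      set j := prev.length with hjdef
      set t := min j idx with ht
      have hidxlen : idx ≤ M.length := by simpa using hle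
      have hlt' : ∀ i : Nat, i < M.length → i < idx → (M.getD i ((0 : Int), (0 : Int))).1 < rem := by
        intro i hi hii
        have h1 := hlt i (by simpa using hi) hii
        rw [List.getElem_map] at h1
        rw [List.getD_eq_getElem _ _ hi]
        exact h1
      have hge' : ∀ i : Nat, i < M.length → idx ≤ i → rem ≤ (M.getD i ((0 : Int), (0 : Int))).1 := by
        intro i hi hii
        have h1 := hge i (by simpa using hi) hii
        rw [List.getElem_map] at h1
        rw [List.getD_eq_getElem _ _ hi]
        exact h1
      have hprevD : ∀ i : Nat, i < prev.length →
          prev.getD i ((0 : Int), (0 : Int)) = M.getD i ((0 : Int), (0 : Int)) := by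
        intro i hi
        rw [hEq, List.getD_append _ _ _ i hi]
      -- guards are true on the first t previous machines, false on the rest of them
      have htake : ∀ m ∈ prev.take t, m.1 + c < budget := by
        intro m hm
        obtain ⟨i, hi, hgi⟩ := List.mem_iff_getElem.mp hm
        have hilen : i < prev.length := by rw [List.length_take] at hi; omega
        have hm_eq : m = prev.getD i ((0 : Int), (0 : Int)) := by
          rw [List.getD_eq_getElem _ _ hilen, ← hgi, List.getElem_take]
        have h1 := hlt' i (by omega) (by rw [List.length_take] at hi; omega)
        rw [hm_eq, hprevD i hilen]
        omega
      have hdrop : ∀ m ∈ prev.drop t, ¬ m.1 + c < budget := by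
        intro m hm
        obtain ⟨i, hi, hgi⟩ := List.mem_iff_getElem.mp hm
        have hlen3 : t + i < prev.length := by rw [List.length_drop] at hi; omega
        have hm_eq : m = prev.getD (t + i) ((0 : Int), (0 : Int)) := by
          rw [List.getD_eq_getElem _ _ hlen3, ← hgi, List.getElem_drop]
        have h1 := hge' (t + i) (by omega) (by omega)
        rw [hm_eq, hprevD (t + i) hlen3]
        omega
      have hfold : prev.foldl (fun b (m : Int × Int) => if m.1 + c < budget then max b (m.2 + k) else b) acc1
          = max acc1 (k + (prev.take t).foldl (fun a m => max a m.2) 0) := by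
        conv_lhs => rw [(List.take_append_drop t prev).symm]
        rw [List.foldl_append,
          maxCapFoldl_guard_true c k budget _ _ htake,
          maxCapFoldl_guard_false c k budget _ _ hdrop]
        conv_lhs => rw [(show acc1 = max acc1 (k + 0) by omega)]
        rw [maxCapFoldl_max_add k (prev.take t) acc1 0]
      rw [hfold]
      by_cases ht0 : 0 < t
      · rw [if_pos (show (0 : Int) ≤ min (j : Int) (idx : Int) - 1 by omega)]
        have hcast : min (j : Int) (idx : Int) - 1 = ((t - 1 : Nat) : Int) := by
          push_cast [ht]; omega
        rw [hcast, PySem.List.pyGetD_natCast, maxCapPmList_getD M 0 (t - 1) (by omega),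
          (show t - 1 + 1 = t by omega),
          (show M.take t = prev.take t by rw [hEq]; exact List.take_append_of_le_length (by omega))]
      · rw [if_neg (show ¬ (0 : Int) ≤ min (j : Int) (idx : Int) - 1 by omega),
          (show t = 0 by omega)]
        simp only [List.take_zero, List.foldl_nil]
        omega
    · simp only [hget, if_neg hc]
      -- A breaks; B's remaining iterations are all skipped since costs only grow
      have hrest : ∀ m ∈ rest, ¬ m.1 < budget := by
        intro m hm
        have hsub : List.Pairwise (fun a b : Int × Int => a.1 ≤ b.1) ((c, k) :: rest) := by
          rw [hEq] at hM
          exact (List.pairwise_append.mp hM).2.1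
        have := (List.pairwise_cons.mp hsub).1 m hm
        omega
      rw [maxCapLoopB_skip budget rest _ acc hrest]

theorem maxCapacity_spec_aux (costs capacity : List Int) (budget : Int)
    (hpre : costs.length ≤ capacity.length) :
    maxCapacity costs capacity budget = maxCapacity_alt costs capacity budget := by
  have hpair : List.Pairwise (fun a b : Int × Int => a.1 ≤ b.1)
      (PySem.List.sorted2 (costs.zip capacity) (fun m => m.1) (fun m => m.2)) := by
    rw [maxCap_sorted2_eq_sorted_lex]; exact maxCap_machines_pairwise _
  set machines := PySem.List.sorted2 (costs.zip capacity) (fun m => m.1) (fun m => m.2) with hmach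
  have hlenM : machines.length = costs.length := by
    rw [hmach, (PySem.List.sorted2_perm _ _ _ _).length_eq, List.length_zip]
    omega
  have hlen2 : PySem.List.len costs = PySem.List.len machines := by
    simp [PySem.List.len, hlenM]
  show maxCapLoopA machines (machines.map (fun m => m.1))
      ((PySem.List.pyRange 0 (PySem.List.len costs)).foldl
        (fun (acc : List Int × Int) j =>
          (fun (st : List Int × Int) (m : Int × Int) => (st.1 ++ [max st.2 m.2], max st.2 m.2)) acc
            (PySem.List.pyGetD machines j (0, 0))) ([], 0)).1
      budget (PySem.List.pyRange 0 (PySem.List.len costs)) 0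
    = maxCapLoopB budget machines [] 0
  rw [hlen2, PySem.List.foldl_pyRange_zero_pyGetD machines ((0 : Int), (0 : Int))
    (fun (st : List Int × Int) (m : Int × Int) => (st.1 ++ [max st.2 m.2], max st.2 m.2)) (([], 0) : List Int × Int)]
  rw [maxCapPm_fold machines [] 0, List.nil_append]
  have h := maxCapLoops_eq machines budget hpair machines [] 0 (by simp)
  simpa [PySem.List.len] using h

-- ===== VERDICT (by name: the statement is the Claim_ definition above) =====
theorem maxCapacity_spec : Claim_equal_maxCapacity := by
  intro costs capacity budget _ hpre
  unfold Spec_maxCapacity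
  exact maxCapacity_spec_aux costs capacity budget hpre
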